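-- pv_equiv track=rewrite | github.com/rwth-i6/returnn | returnn/native_op.py | naive_chunk_start_frames
-- ===== SOURCE A (Python) =====
-- def naive_chunk_start_frames(n_time, chunk_size, chunk_step):
--     """
--     This is just for documentation / demonstration. Also used by testing code.
--     """
--     t = 0
--     chunk_start_frames = []
--     while True:
--         chunk_start_frames.append(t)
--         if t + chunk_size >= n_time:
--             break
--         t += chunk_step
--     return chunk_start_frames
-- ===== SOURCE B (Python) =====
-- def naive_chunk_start_frames(n_time, chunk_size, chunk_step):
--     d = n_time - chunk_size
--     k = 0 if d <= 0 else -(-d // chunk_step)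
--     return [i * chunk_step for i in range(k + 1)]
-- ===== Notes on version B (the rewrite author's own statement) =====
-- stated objective: simpler
-- what changed: Replaces the condition-driven while/append loop with a closed-form chunk count (ceiling division) followed by a direct range comprehension of multiples of chunk_step.
import Mathlib
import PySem

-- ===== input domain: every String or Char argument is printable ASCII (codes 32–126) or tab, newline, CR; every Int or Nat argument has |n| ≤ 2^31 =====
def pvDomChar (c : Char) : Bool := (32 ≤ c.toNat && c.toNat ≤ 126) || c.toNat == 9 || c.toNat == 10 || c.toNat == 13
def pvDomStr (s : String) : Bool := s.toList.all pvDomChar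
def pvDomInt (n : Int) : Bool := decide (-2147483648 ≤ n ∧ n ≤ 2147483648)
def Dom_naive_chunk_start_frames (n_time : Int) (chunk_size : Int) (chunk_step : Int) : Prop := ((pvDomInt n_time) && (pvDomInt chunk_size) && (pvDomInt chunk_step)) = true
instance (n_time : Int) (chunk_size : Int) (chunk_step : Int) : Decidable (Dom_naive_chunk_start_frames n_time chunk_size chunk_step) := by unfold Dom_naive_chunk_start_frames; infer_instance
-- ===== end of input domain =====

-- B replaces A's condition-driven while/append loop by a closed-form chunk count
-- (ceiling division) followed by a direct range map — objective: simpler.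
-- Pre_ excludes only the inputs on which A loops forever (never returns).


-- ===== PORT A =====
-- A's `while True` loop, made total with a fuel bound; on every input satisfying
-- Pre_ the fuel is never exhausted (proved below), so this computes exactly A's loop.
def chunkLoopA (n_time : Int) (chunk_size : Int) (chunk_step : Int) : Nat → Int → List Int
  | 0, _ => []
  | fuel + 1, t =>
      if t + chunk_size ≥ n_time then [t]
      else t :: chunkLoopA n_time chunk_size chunk_step fuel (t + chunk_step)

def naive_chunk_start_frames (n_time : Int) (chunk_size : Int) (chunk_step : Int) : List Int :=
  chunkLoopA n_time chunk_size chunk_step ((n_time - chunk_size).toNat + 1) 0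

-- ===== PORT B =====
def naive_chunk_start_frames_alt (n_time : Int) (chunk_size : Int) (chunk_step : Int) : List Int :=
  let d := n_time - chunk_size
  let k : Int := if d ≤ 0 then 0 else -(PySem.Int.floordiv (-d) chunk_step)
  (PySem.List.pyRange 0 (k + 1) 1).map (fun i => i * chunk_step)

-- ===== PRECONDITION & SPEC =====
-- Pre_ excludes exactly the inputs on which A's while-loop never terminates
-- (chunk_step ≤ 0 while the first frame does not already cover n_time).
def Pre_naive_chunk_start_frames (n_time : Int) (chunk_size : Int) (chunk_step : Int) : Prop :=
  n_time ≤ chunk_size ∨ 0 < chunk_step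
instance (n_time : Int) (chunk_size : Int) (chunk_step : Int) : Decidable (Pre_naive_chunk_start_frames n_time chunk_size chunk_step) := by unfold Pre_naive_chunk_start_frames; infer_instance

def pvWitness_naive_chunk_start_frames : Int × Int × Int := (10, 4, 3)

def Spec_naive_chunk_start_frames (n_time : Int) (chunk_size : Int) (chunk_step : Int) (out : List Int) : Prop := out = naive_chunk_start_frames_alt n_time chunk_size chunk_step
instance (n_time : Int) (chunk_size : Int) (chunk_step : Int) (out : List Int) : Decidable (Spec_naive_chunk_start_frames n_time chunk_size chunk_step out) := by unfold Spec_naive_chunk_start_frames; infer_instance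

-- ===== CLAIM (what is proved, stated in full; the proofs are below) =====
def Claim_equal_naive_chunk_start_frames : Prop := ∀ (n_time : Int) (chunk_size : Int) (chunk_step : Int), Dom_naive_chunk_start_frames n_time chunk_size chunk_step → Pre_naive_chunk_start_frames n_time chunk_size chunk_step → Spec_naive_chunk_start_frames n_time chunk_size chunk_step (naive_chunk_start_frames n_time chunk_size chunk_step)

-- ===== LEMMAS AND PROOFS =====

-- The loop, started at t = j * s with enough fuel, produces the multiples of s
-- for indices j .. K, where K is the stopping index.
lemma chunkLoopA_eq (n c s K : Int) (hK : 0 ≤ K)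
    (hstop : K * s + c ≥ n) (hcont : ∀ j : Int, 0 ≤ j → j < K → j * s + c < n) :
    ∀ (fuel : Nat) (j : Int), 0 ≤ j → j ≤ K → K - j < (fuel : Int) →
      chunkLoopA n c s fuel (j * s) =
        (PySem.List.pyRange j (K + 1) 1).map (fun i => i * s) := by
  intro fuel
  induction fuel with
  | zero => intro j hj hjK hf; omega
  | succ f ih =>
    intro j hj hjK hf
    by_cases h : j < K
    · have hlt : j * s + c < n := hcont j hj h
      have : ¬ (j * s + c ≥ n) := by omega
      simp only [chunkLoopA, this, if_false]
      have hstep : j * s + s = (j + 1) * s := by ring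
      rw [hstep, ih (j + 1) (by omega) (by omega) (by omega)]
      rw [PySem.List.pyRange_one_cons (by omega : j < K + 1)]
      simp
    · have hjK' : j = K := by omega
      subst hjK'
      simp only [chunkLoopA, ge_iff_le, if_pos (by omega : n ≤ j * s + c)]
      rw [show (j + 1 : Int) = j + 1 from rfl, PySem.List.pyRange_one_cons (by omega : j < j + 1),
          PySem.List.pyRange_one_eq_nil (by omega : j + 1 ≤ j + 1)]
      simp

-- ===== VERDICT (by name: the statement is the Claim_ definition above) =====
theorem naive_chunk_start_frames_spec : Claim_equal_naive_chunk_start_frames := by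
  intro n c s _ hpre
  unfold Spec_naive_chunk_start_frames naive_chunk_start_frames naive_chunk_start_frames_alt
  by_cases hd : n - c ≤ 0
  · -- K = 0: the loop stops immediately
    simp only [hd, if_pos]
    have h0 := chunkLoopA_eq n c s 0 le_rfl (by omega)
      (by intro j hj hjK; omega) ((n - c).toNat + 1) 0 le_rfl le_rfl (by omega)
    simpa using h0
  · -- n - c > 0: Pre_ gives 0 < s; K = ceil((n-c)/s)
    have hs : 0 < s := by rcases hpre with h | h; omega; exact h
    have hd' : 0 < n - c := by omega
    set d : Int := n - c with hdd
    set q : Int := PySem.Int.floordiv (-d) s with hq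
    have hqe : q = (-d) / s := by
      rw [hq, PySem.Int.floordiv_eq_ediv_of_pos hs]
    have hmod : (-d) % s + s * ((-d) / s) = -d := by have := Int.emod_add_mul_ediv (-d) s; linarith
    have hr0 : 0 ≤ (-d) % s := Int.emod_nonneg _ (by omega)
    have hr1 : (-d) % s < s := Int.emod_lt_of_pos _ hs
    set r : Int := (-d) % s with hrr
    have heq : s * q = -d - r := by rw [hqe]; omega
    -- K := -q ; basic bounds
    have hKpos : 0 < -q := by nlinarith
    have hstop : (-q) * s + c ≥ n := by nlinarith
    have hcont : ∀ j : Int, 0 ≤ j → j < -q → j * s + c < n := by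
      intro j hj hjK
      have h1 : j * s ≤ (-q - 1) * s :=
        mul_le_mul_of_nonneg_right (by omega) (by omega)
      nlinarith
    have hfuel : -q - 0 < (((n - c).toNat + 1 : Nat) : Int) := by
      have hq1 : q ≤ -1 := by omega
      have hK_le_d : -q ≤ d := by
        nlinarith [mul_nonneg (by omega : (0:Int) ≤ -q - 1) (by omega : (0:Int) ≤ s - 1)]
      omega
    have h0 := chunkLoopA_eq n c s (-q) (by omega) hstop hcont
      ((n - c).toNat + 1) 0 le_rfl (by omega) hfuel
    simp only [if_neg hd]
    simpa using h0
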